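-- pv_equiv track=rewrite | github.com/luctivud/CP-Submissions | Others/2022_infytqR2_anshu_2.py | emirpNumbers
-- ===== SOURCE A (Python) =====
-- def emirpNumbers(N):
--     isPrime = [1] * (N+1)
--     sumOfPrimeDivisors = [0] * (N+1)
--
--     for i in range(2, N+1):
--         if isPrime[i]:
--             for j in range(i, N+1, i):
--                 isPrime[j] = 0
--                 sumOfPrimeDivisors[j] += i
--     for i in range(2, N+1):
--         if i*i > N:
--             break
--         sumOfPrimeDivisors[i*i] += i
--
--     ans = 0
--     for i in range(2, N+1):
--         ans += (sumOfPrimeDivisors[i] == i)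
--     return ans
-- ===== SOURCE B (Python) =====
-- def emirpNumbers(N):
--     # A number i >= 2 satisfies A's condition (sum of distinct prime divisors,
--     # plus sqrt(i) again when i is a perfect square, equals i) exactly when i is
--     # prime or i == 4.  So the answer is pi(N) + (1 if N >= 4 else 0), computed
--     # with a plain boolean Eratosthenes sieve whose marking loop stops at sqrt(N).
--     if N < 2:
--         return 0
--     composite = [False] * (N + 1)
--     i = 2
--     while i * i <= N:
--         if not composite[i]:
--             for j in range(i * i, N + 1, i):
--                 composite[j] = True
--         i += 1
--     ans = 1 if N >= 4 else 0
--     for i in range(2, N + 1):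
--         if not composite[i]:
--             ans += 1
--     return ans
-- ===== Notes on version B (the rewrite author's own statement) =====
-- stated objective: faster
-- what changed: B replaces A's integer sum-of-prime-divisors sieve plus square-correction pass plus equality scan by the identity answer = primeCount(N) + (1 if N >= 4 else 0), computed with a plain boolean Eratosthenes sieve whose marking loop stops at sqrt(N).
import Mathlib
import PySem

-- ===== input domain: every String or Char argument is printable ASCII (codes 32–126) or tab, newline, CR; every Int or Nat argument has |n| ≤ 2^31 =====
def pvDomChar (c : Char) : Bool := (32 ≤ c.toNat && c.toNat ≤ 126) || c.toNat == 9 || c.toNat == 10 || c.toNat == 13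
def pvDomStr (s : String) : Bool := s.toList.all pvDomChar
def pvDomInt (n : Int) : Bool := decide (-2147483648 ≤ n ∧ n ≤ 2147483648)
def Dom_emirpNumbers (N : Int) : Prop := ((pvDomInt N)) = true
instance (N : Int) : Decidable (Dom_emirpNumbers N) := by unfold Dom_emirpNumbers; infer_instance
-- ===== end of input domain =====

-- B replaces A's sum-of-prime-divisors sieve (+ square-correction pass + equality scan)
-- by the identity  answer = #(primes ≤ N) + (1 if N ≥ 4 else 0)  computed with a plain
-- boolean Eratosthenes sieve whose marking loop stops at √N (measured constant-factor speedup).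

-- ===== PORT A =====
-- Python's lists are mutable arrays, so both ports keep their table state in `Array`
-- (`Array.getD` / `Array.setIfInBounds`). Every index below comes from a `range(...)`
-- start ≥ 2, so it is nonnegative and provably < len(list): `i.toNat` is exact here
-- and the in-bounds reads/writes are exactly Python's `xs[i]` / `xs[i] = v`.
-- inner marking loop of A's first pass: "for j in range(i, N+1, i): isPrime[j]=0; sums[j]+=i"
def emirpAMark (N i : Int) (st : Array Int × Array Int) : Array Int × Array Int :=
  (PySem.List.pyRange i (N + 1) i).foldl (fun st2 j =>
    (st2.1.setIfInBounds j.toNat 0,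
     st2.2.setIfInBounds j.toNat (st2.2.getD j.toNat 0 + i))) st

-- one iteration of A's first pass: "if isPrime[i]: <mark>"
def emirpAStep (N : Int) (st : Array Int × Array Int) (i : Int) : Array Int × Array Int :=
  if st.1.getD i.toNat 0 ≠ 0 then emirpAMark N i st else st

-- A's second pass with its break: "for i in range(2,N+1): if i*i > N: break; sums[i*i] += i"
def emirpASquares (N : Int) : List Int → Array Int → Array Int
  | [], s => s
  | i :: rest, s =>
    if i * i > N then s
    else emirpASquares N rest
      (s.setIfInBounds (i * i).toNat (s.getD (i * i).toNat 0 + i))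

def emirpNumbers (N : Int) : Int :=
  let st := (PySem.List.pyRange 2 (N + 1) 1).foldl (emirpAStep N)
    (Array.replicate (N + 1).toNat (1 : Int), Array.replicate (N + 1).toNat (0 : Int))
  let sums2 := emirpASquares N (PySem.List.pyRange 2 (N + 1) 1) st.2
  (PySem.List.pyRange 2 (N + 1) 1).foldl (fun ans i =>
    ans + (if sums2.getD i.toNat 0 = i then 1 else 0)) 0

-- ===== PORT B =====
-- B's inner marking loop: "for j in range(i*i, N+1, i): composite[j] = True"
def emirpAltMark (N i : Int) (comp : Array Bool) : Array Bool :=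
  (PySem.List.pyRange (i * i) (N + 1) i).foldl (fun c j => c.setIfInBounds j.toNat true) comp

-- B's while loop: "while i*i <= N: if not composite[i]: <mark>; i += 1"
def emirpAltSieve (N i : Int) (comp : Array Bool) : Array Bool :=
  if i * i ≤ N then
    emirpAltSieve N (i + 1)
      (if comp.getD i.toNat false = false then emirpAltMark N i comp else comp)
  else comp
termination_by (N + 1 - i).toNat
decreasing_by
  have hi : i ≤ N := by nlinarith [sq_nonneg i, sq_nonneg (i - 1)]
  omega

def emirpNumbers_alt (N : Int) : Int :=
  if N < 2 then 0
  else
    let comp := emirpAltSieve N 2 (Array.replicate (N + 1).toNat false)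
    (PySem.List.pyRange 2 (N + 1) 1).foldl (fun ans i =>
      if comp.getD i.toNat false = false then ans + 1 else ans)
      (if N ≥ 4 then 1 else 0)

-- ===== PRECONDITION & SPEC =====
def Spec_emirpNumbers (N : Int) (out : Int) : Prop := out = emirpNumbers_alt N
instance (N : Int) (out : Int) : Decidable (Spec_emirpNumbers N out) := by unfold Spec_emirpNumbers; infer_instance

-- ===== CLAIM (what is proved, stated in full; the proofs are below) =====
def Claim_equal_emirpNumbers : Prop := ∀ (N : Int), Dom_emirpNumbers N → Spec_emirpNumbers N (emirpNumbers N)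

-- ===== LEMMAS AND PROOFS =====

-- sum of the distinct prime divisors of m
def pvSpd (m : ℕ) : ℕ := ∑ p ∈ m.primeFactors, p
-- A's square correction: + √m when m is a perfect square with root ≥ 2
def pvCorr (m : ℕ) : ℕ := if Nat.sqrt m * Nat.sqrt m = m ∧ 2 ≤ Nat.sqrt m then Nat.sqrt m else 0
-- "m was marked by A's first pass after the outer loop has processed 2..k-1"
abbrev pvMarkedA (k m : ℕ) : Prop := ∃ p < k, p.Prime ∧ p ∣ m ∧ p ≤ m
-- partial prime-divisor sum after processing 2..k-1
def pvSumA (k m : ℕ) : ℕ := ∑ p ∈ Finset.range k, if p.Prime ∧ p ∣ m ∧ p ≤ m then p else 0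
-- "m was marked by B's sieve after the while loop has processed 2..k-1"
abbrev pvMarkedB (k m : ℕ) : Prop := ∃ p < k, p.Prime ∧ p ∣ m ∧ p * p ≤ m

-- (l.set k v).getD with an in-range k
theorem pv_getD_set {α : Type} (xs : Array α) (k m : ℕ) (v d : α) (hk : k < xs.size) :
    (xs.setIfInBounds k v).getD m d = if m = k then v else xs.getD m d := by
  simp only [Array.getD_eq_getD_getElem?, Array.getElem?_setIfInBounds]
  by_cases h : m = k
  · subst h; simp [hk]
  · rw [if_neg (fun hkm => h hkm.symm), if_neg h]

-- generic in-range pySetD loop over distinct indices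
theorem pv_foldl_set_getD {α : Type} (g : Array α → ℤ → Array α) (f : α → α) (d : α)
    (hg : ∀ c j, g c j = c.setIfInBounds j.toNat (f (c.getD j.toNat d)))
    (L : List ℤ) (xs : Array α)
    (hnd : L.Nodup) (hb : ∀ j ∈ L, 0 ≤ j ∧ j < (xs.size : ℤ)) (m : ℕ) :
    (L.foldl g xs).getD m d
      = if (m : ℤ) ∈ L then f (xs.getD m d) else xs.getD m d := by
  induction L generalizing xs with
  | nil => simp
  | cons j L ih =>
    obtain ⟨hj0, hjl⟩ := hb j (List.mem_cons_self ..)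
    have hjn : j.toNat < xs.size := by omega
    have hset : g xs j = xs.setIfInBounds j.toNat (f (xs.getD j.toNat d)) := hg xs j
    rw [List.foldl_cons, hset]
    have hb' : ∀ j' ∈ L, 0 ≤ j' ∧
        j' < ((xs.setIfInBounds j.toNat (f (xs.getD j.toNat d))).size : ℤ) := by
      simpa [Array.size_setIfInBounds] using fun j' hj' => hb j' (List.mem_cons_of_mem _ hj')
    rw [ih _ (List.Nodup.of_cons hnd) hb']
    by_cases hmem : (m : ℤ) ∈ L
    · have hmj : (m : ℤ) ≠ j := fun h => (List.nodup_cons.mp hnd).1 (h ▸ hmem)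
      rw [if_pos hmem, pv_getD_set _ _ _ _ _ hjn, if_neg (fun h => hmj (by omega)),
        if_pos (List.mem_cons_of_mem _ hmem)]
    · rw [if_neg hmem, pv_getD_set _ _ _ _ _ hjn]
      by_cases hmj : m = j.toNat
      · rw [if_pos hmj, if_pos (by rw [List.mem_cons]; left; omega), hmj]
      · rw [if_neg hmj, if_neg (by rw [List.mem_cons]; push Not; exact ⟨fun h => hmj (by omega), hmem⟩)]

theorem pv_foldl_set_length {α : Type} (g : Array α → ℤ → Array α) (f : α → α) (d : α)
    (hg : ∀ c j, g c j = c.setIfInBounds j.toNat (f (c.getD j.toNat d)))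
    (L : List ℤ) (xs : Array α) :
    (L.foldl g xs).size = xs.size := by
  induction L generalizing xs with
  | nil => rfl
  | cons j L ih => rw [List.foldl_cons, ih, hg, Array.size_setIfInBounds]

-- membership in the multiples range
theorem pv_mem_mult_range (k n : ℕ) (hk : 2 ≤ k) (m : ℕ) :
    ((m : ℤ) ∈ PySem.List.pyRange ((k : ℤ) * k) ((n : ℤ) + 1) k) ↔
      (k * k ≤ m ∧ m ≤ n ∧ k ∣ m) := by
  rw [PySem.List.mem_pyRange_iff_of_pos (by exact_mod_cast (by omega : 0 < k))]
  constructor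
  · rintro ⟨h1, h2, c, hc⟩
    have hdvd : (k : ℤ) ∣ m := ⟨k + c, by linarith⟩
    refine ⟨by exact_mod_cast h1, by omega, ?_⟩
    exact_mod_cast hdvd
  · rintro ⟨h1, h2, c, hc⟩
    exact ⟨by exact_mod_cast h1, by omega, c - k, by push_cast [hc]; ring⟩

theorem pv_mem_mult_range' (k n : ℕ) (hk : 2 ≤ k) (m : ℕ) :
    ((m : ℤ) ∈ PySem.List.pyRange (k : ℤ) ((n : ℤ) + 1) k) ↔
      (k ≤ m ∧ m ≤ n ∧ k ∣ m) := by
  rw [PySem.List.mem_pyRange_iff_of_pos (by exact_mod_cast (by omega : 0 < k))]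
  constructor
  · rintro ⟨h1, h2, c, hc⟩
    have hdvd : (k : ℤ) ∣ m := ⟨1 + c, by linarith⟩
    refine ⟨by exact_mod_cast h1, by omega, ?_⟩
    exact_mod_cast hdvd
  · rintro ⟨h1, h2, c, hc⟩
    exact ⟨by exact_mod_cast h1, by omega, c - 1, by push_cast [hc]; ring⟩

theorem pv_nodup_pyRange_pos (a b s : ℤ) (hs : 0 < s) : (PySem.List.pyRange a b s).Nodup := by
  rw [PySem.List.pyRange_of_pos a b hs]
  refine (List.nodup_range).map ?_
  intro x y hxy
  have : (x : ℤ) = y := by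
    have := hxy
    nlinarith [this]
  exact_mod_cast this

-- ---- number theory ----
theorem pv_sum_le_prod (s : Finset ℕ) : (∀ x ∈ s, 2 ≤ x) → ∑ x ∈ s, x ≤ ∏ x ∈ s, x := by
  induction s using Finset.induction_on with
  | empty => simp
  | insert a s ha ih =>
    intro h2
    rw [Finset.sum_insert ha, Finset.prod_insert ha]
    have ha2 : 2 ≤ a := h2 a (Finset.mem_insert_self a s)
    have ih' := ih (fun x hx => h2 x (Finset.mem_insert_of_mem hx))
    rcases Finset.eq_empty_or_nonempty s with rfl | ⟨b, hb⟩
    · simp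
    · have hbp : 2 ≤ ∏ x ∈ s, x := by
        refine le_trans (h2 b (Finset.mem_insert_of_mem hb)) (Finset.single_le_prod' (f := fun x => x) ?_ hb)
        intro i hi
        simpa using le_trans one_le_two (h2 i (Finset.mem_insert_of_mem hi))
      nlinarith

theorem pv_sum_lt_prod (s : Finset ℕ) (h : ∀ x ∈ s, 2 ≤ x) (hc : 2 ≤ s.card) :
    ∑ x ∈ s, x < ∏ x ∈ s, x := by
  obtain ⟨a, ha, b, hb, hab⟩ := Finset.one_lt_card.mp hc
  rw [← Finset.add_sum_erase s _ ha, ← Finset.mul_prod_erase s _ ha]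
  have hbe : b ∈ s.erase a := Finset.mem_erase.mpr ⟨fun h => hab h.symm, hb⟩
  have h2 : ∀ x ∈ s.erase a, 2 ≤ x := fun x hx => h x (Finset.mem_of_mem_erase hx)
  have hsum := pv_sum_le_prod _ h2
  have hprod : 2 ≤ ∏ x ∈ s.erase a, x := by
    refine le_trans (h2 b hbe) (Finset.single_le_prod' (f := fun x => x) ?_ hbe)
    intro i hi
    simpa using le_trans one_le_two (h2 i hi)
  have ha2 : 2 ≤ a := h a ha
  have hb3 : b ≤ ∏ x ∈ s.erase a, x := by
    refine Finset.single_le_prod' (f := fun x => x) ?_ hbe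
    intro i hi
    simpa using le_trans one_le_two (h2 i hi)
  have hkey : 3 ≤ a ∨ 3 ≤ ∏ x ∈ s.erase a, x := by
    rcases Nat.lt_or_ge a 3 with hlt | hge
    · right
      have hb2 : 2 ≤ b := h2 b hbe
      omega
    · left; omega
  rcases hkey with h3 | h3 <;> nlinarith

-- the counted predicate of A holds exactly on primes and on 4
-- check-time characterizations
theorem pv_pf_two_le (m p : ℕ) (hp : p ∈ m.primeFactors) : 2 ≤ p :=
  (Nat.mem_primeFactors.mp hp).1.two_le

theorem pv_spd_le (m : ℕ) (hm : 1 ≤ m) : pvSpd m ≤ m :=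
  le_trans (pv_sum_le_prod _ (pv_pf_two_le m))
    (Nat.le_of_dvd hm (Nat.prod_primeFactors_dvd m))

theorem pv_spd_prime (m : ℕ) (hm : m.Prime) : pvSpd m = m := by
  simp [pvSpd, hm.primeFactors]

theorem pv_spd_lt (m : ℕ) (hm : 2 ≤ m) (hnp : ¬ m.Prime) : pvSpd m < m := by
  rcases Nat.lt_or_ge m.primeFactors.card 2 with hc | hc
  · have hne : m.primeFactors.Nonempty := Nat.nonempty_primeFactors.mpr (by omega)
    have hc1 : m.primeFactors.card = 1 := by
      have := Finset.card_pos.mpr hne; omega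
    obtain ⟨q, hq⟩ := Finset.card_eq_one.mp hc1
    have hqm : q ∈ m.primeFactors := by simp [hq]
    obtain ⟨hqp, hqd, _⟩ := Nat.mem_primeFactors.mp hqm
    have hql : q ≠ m := fun h => hnp (h ▸ hqp)
    have : pvSpd m = q := by simp [pvSpd, hq]
    rw [this]
    exact lt_of_le_of_ne (Nat.le_of_dvd (by omega) hqd) hql
  · exact lt_of_lt_of_le (pv_sum_lt_prod _ (pv_pf_two_le m) hc)
      (Nat.le_of_dvd (by omega) (Nat.prod_primeFactors_dvd m))

theorem pv_prime_not_sq (m : ℕ) (hm : m.Prime) :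
    ¬ (Nat.sqrt m * Nat.sqrt m = m ∧ 2 ≤ Nat.sqrt m) := by
  rintro ⟨h1, h2⟩
  have hd : Nat.sqrt m ∣ m := ⟨Nat.sqrt m, h1.symm⟩
  rcases hm.eq_one_or_self_of_dvd _ hd with h | h
  · omega
  · nlinarith [hm.two_le]

theorem pv_predA_iff (m : ℕ) (hm : 2 ≤ m) :
    (pvSpd m + pvCorr m = m) ↔ (m.Prime ∨ m = 4) := by
  constructor
  · intro h
    by_contra hcon
    push Not at hcon
    obtain ⟨hnp, hne4⟩ := hcon
    by_cases hsq : Nat.sqrt m * Nat.sqrt m = m ∧ 2 ≤ Nat.sqrt m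
    · -- m = t*t, t = sqrt m ≥ 2
      obtain ⟨h1, h2⟩ := hsq
      set t := Nat.sqrt m with ht
      have ht3 : 3 ≤ t := by
        rcases Nat.lt_or_ge t 3 with hlt | hge
        · exfalso; apply hne4
          have hsm : t = 2 := by omega
          rw [hsm] at h1; omega
        · exact hge
      have hpf : m.primeFactors = t.primeFactors := by
        rw [← h1, ← sq]
        exact Nat.primeFactors_pow t (by norm_num)
      have hspd : pvSpd m ≤ t := by
        rw [pvSpd, hpf]
        exact pv_spd_le t (by omega)
      rw [pvCorr, if_pos ⟨h1, h2⟩] at h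
      nlinarith
    · rw [pvCorr, if_neg hsq] at h
      have := pv_spd_lt m hm hnp
      omega
  · rintro (hp | h4)
    · rw [pvCorr, if_neg (pv_prime_not_sq m hp), pv_spd_prime m hp]; omega
    · subst h4
      have h2 : Nat.sqrt 4 = 2 := by
        have := Nat.sqrt_eq 2; omega
      have hpf : (4 : ℕ).primeFactors = {2} := by
        have : (4 : ℕ) = 2 ^ 2 := by norm_num
        rw [this, Nat.primeFactors_pow 2 (by norm_num), Nat.Prime.primeFactors Nat.prime_two]
      rw [pvSpd, hpf, pvCorr, if_pos ⟨by rw [h2], by rw [h2]⟩, h2]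
      simp

theorem pv_markedA_self (k : ℕ) (hk : 2 ≤ k) : pvMarkedA k k ↔ ¬ k.Prime := by
  constructor
  · rintro ⟨p, hpk, hp, hdvd, _⟩ hkp
    rcases hkp.eq_one_or_self_of_dvd _ hdvd with h | h
    · exact hp.one_lt.ne' (by omega)
    · omega
  · intro hnp
    refine ⟨k.minFac, ?_, Nat.minFac_prime (by omega), Nat.minFac_dvd k, Nat.minFac_le (by omega)⟩
    have hle := Nat.minFac_le (show 0 < k by omega)
    have hne : k.minFac ≠ k := fun h => hnp (Nat.prime_def_minFac.mpr ⟨hk, h⟩)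
    omega

theorem pv_markedB_self (k : ℕ) (hk : 2 ≤ k) : pvMarkedB k k ↔ ¬ k.Prime := by
  constructor
  · rintro ⟨p, hpk, hp, hdvd, _⟩ hkp
    rcases hkp.eq_one_or_self_of_dvd _ hdvd with h | h
    · exact hp.one_lt.ne' (by omega)
    · omega
  · intro hnp
    have hp := Nat.minFac_prime (show k ≠ 1 by omega)
    have hsq : k.minFac * k.minFac ≤ k := by
      have := Nat.minFac_sq_le_self (show 0 < k by omega) hnp
      nlinarith [this]
    have h2 : 2 ≤ k.minFac := hp.two_le
    refine ⟨k.minFac, by nlinarith, hp, Nat.minFac_dvd k, hsq⟩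

theorem pv_markedB_final (K m : ℕ) (hm : 2 ≤ m) (hK : m < K) : pvMarkedB K m ↔ ¬ m.Prime := by
  constructor
  · rintro ⟨p, hpk, hp, hdvd, hsq⟩ hmp
    rcases hmp.eq_one_or_self_of_dvd _ hdvd with h | h
    · exact hp.one_lt.ne' (by omega)
    · subst h; nlinarith
  · intro hnp
    obtain ⟨p, hpk, hp, hdvd, hsq⟩ := (pv_markedB_self m hm).mpr hnp
    exact ⟨p, by omega, hp, hdvd, hsq⟩

theorem pv_sumA_final (n m : ℕ) (hm : m ≤ n) : pvSumA (n + 1) m = pvSpd m := by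
  rw [pvSumA, ← Finset.sum_filter, pvSpd]
  congr 1
  ext p
  simp only [Finset.mem_filter, Finset.mem_range, Nat.mem_primeFactors]
  constructor
  · rintro ⟨hpn, hp, hdvd, hpm⟩
    exact ⟨hp, hdvd, by have := hp.two_le; omega⟩
  · rintro ⟨hp, hdvd, hne⟩
    have hpm : p ≤ m := Nat.le_of_dvd (by omega) hdvd
    exact ⟨by omega, hp, hdvd, hpm⟩

-- ---- A's first pass ----
def pvAState (n k : ℕ) : Array ℤ × Array ℤ :=
  (PySem.List.pyRange 2 (k : ℤ) 1).foldl (emirpAStep (n : ℤ))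
    (Array.replicate (n + 1) (1 : ℤ), Array.replicate (n + 1) (0 : ℤ))

theorem pv_markedA_succ (k m : ℕ) :
    pvMarkedA (k + 1) m ↔ pvMarkedA k m ∨ (k.Prime ∧ k ∣ m ∧ k ≤ m) := by
  unfold pvMarkedA
  constructor
  · rintro ⟨p, hpk, hp⟩
    rcases Nat.lt_succ_iff_lt_or_eq.mp hpk with h | h
    · exact Or.inl ⟨p, h, hp⟩
    · subst h; exact Or.inr hp
  · rintro (⟨p, hpk, hp⟩ | h)
    · exact ⟨p, by omega, hp⟩
    · exact ⟨k, by omega, h⟩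

theorem pv_markedB_succ (k m : ℕ) :
    pvMarkedB (k + 1) m ↔ pvMarkedB k m ∨ (k.Prime ∧ k ∣ m ∧ k * k ≤ m) := by
  unfold pvMarkedB
  constructor
  · rintro ⟨p, hpk, hp⟩
    rcases Nat.lt_succ_iff_lt_or_eq.mp hpk with h | h
    · exact Or.inl ⟨p, h, hp⟩
    · subst h; exact Or.inr hp
  · rintro (⟨p, hpk, hp⟩ | h)
    · exact ⟨p, by omega, hp⟩
    · exact ⟨k, by omega, h⟩

theorem pv_sumA_succ (k m : ℕ) :
    pvSumA (k + 1) m = pvSumA k m + if k.Prime ∧ k ∣ m ∧ k ≤ m then k else 0 :=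
  Finset.sum_range_succ _ k

theorem pv_getD_replicate {α : Type} (a d : α) (c m : ℕ) (hm : m < c) :
    (Array.replicate c a).getD m d = a := by
  rw [Array.getD_eq_getD_getElem?, Array.getElem?_replicate, if_pos hm]
  rfl

theorem pv_aLoop (n : ℕ) (k : ℕ) (hk : 2 ≤ k) (hk2 : k ≤ n + 1) :
    (pvAState n k).1.size = n + 1 ∧ (pvAState n k).2.size = n + 1 ∧
    ∀ m ≤ n, (pvAState n k).1.getD m 0 = (if pvMarkedA k m then 0 else 1) ∧
             (pvAState n k).2.getD m 0 = (pvSumA k m : ℤ) := by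
  revert hk2
  induction k, hk using Nat.le_induction with
  | base =>
    intro _
    have hnil : PySem.List.pyRange 2 ((2 : ℕ) : ℤ) 1 = [] :=
      PySem.List.pyRange_one_eq_nil (by norm_num)
    unfold pvAState
    rw [hnil]
    refine ⟨by simp [Array.size_replicate], by simp [Array.size_replicate], fun m hm => ⟨?_, ?_⟩⟩
    · rw [List.foldl_nil]
      have : ¬ pvMarkedA 2 m := by
        rintro ⟨p, hp2, hp, -⟩
        have := hp.two_le; omega
      rw [if_neg this]
      exact pv_getD_replicate _ _ _ _ (by omega)
    · rw [List.foldl_nil]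
      have hz : pvSumA 2 m = 0 := by
        refine Finset.sum_eq_zero fun p hp => ?_
        rw [if_neg]
        rintro ⟨hpp, -⟩
        have := hpp.two_le
        have := Finset.mem_range.mp hp
        omega
      rw [hz]
      push_cast
      exact pv_getD_replicate _ _ _ _ (by omega)
  | succ k hk1 ih =>
    intro hk2
    have hkn : k ≤ n := by omega
    obtain ⟨hL1, hL2, hInv⟩ := ih (by omega)
    have hstep : pvAState n (k + 1) = emirpAStep (n : ℤ) (pvAState n k) (k : ℤ) := by
      unfold pvAState
      rw [show (((k : ℕ) + 1 : ℕ) : ℤ) = (k : ℤ) + 1 by push_cast; ring,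
        PySem.List.pyRange_one_succ_right (by exact_mod_cast hk1 : (2:ℤ) ≤ (k:ℤ)),
        List.foldl_append, List.foldl_cons, List.foldl_nil]
    rw [hstep]
    unfold emirpAStep
    have hget : (pvAState n k).1.getD ((k : ℤ)).toNat 0
        = (if pvMarkedA k k then 0 else 1) := by
      rw [Int.toNat_natCast]
      exact (hInv k hkn).1
    by_cases hMk : pvMarkedA k k
    · -- k is composite: branch not taken, nothing changes
      have hnp : ¬ k.Prime := (pv_markedA_self k hk1).mp hMk
      rw [hget, if_pos hMk, if_neg (by simp)]
      refine ⟨hL1, hL2, fun m hm => ?_⟩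
      obtain ⟨h1, h2⟩ := hInv m hm
      constructor
      · rw [h1]
        by_cases hx : pvMarkedA k m
        · rw [if_pos hx, if_pos ((pv_markedA_succ k m).mpr (Or.inl hx))]
        · rw [if_neg hx, if_neg (fun h => by
            rcases (pv_markedA_succ k m).mp h with h | h
            exacts [hx h, hnp h.1])]
      · rw [h2, pv_sumA_succ, if_neg (by tauto), Nat.add_zero]
    · -- k is prime: mark multiples of k
      have hp : k.Prime := by
        by_contra hnp
        exact hMk ((pv_markedA_self k hk1).mpr hnp)
      rw [hget, if_neg hMk, if_pos (by norm_num)]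
      unfold emirpAMark
      rw [PySem.List.foldl_prod_mk (f := fun (c : Array ℤ) (j : ℤ) => c.setIfInBounds j.toNat 0)
        (g := fun (c : Array ℤ) (j : ℤ) => c.setIfInBounds j.toNat (c.getD j.toNat 0 + (k : ℤ)))
        (a := (pvAState n k).1) (b := (pvAState n k).2)]
      dsimp only
      have hkpos : (0 : ℤ) < (k : ℤ) := by exact_mod_cast (by omega : 0 < k)
      have hnd := pv_nodup_pyRange_pos (k : ℤ) ((n : ℤ) + 1) (k : ℤ) hkpos
      have hb1 : ∀ j ∈ PySem.List.pyRange (k : ℤ) ((n : ℤ) + 1) (k : ℤ),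
          0 ≤ j ∧ j < ((pvAState n k).1.size : ℤ) := by
        intro j hj
        obtain ⟨ha, hb, -⟩ := (PySem.List.mem_pyRange_iff_of_pos hkpos j).mp hj
        rw [hL1]; push_cast; omega
      have hb2 : ∀ j ∈ PySem.List.pyRange (k : ℤ) ((n : ℤ) + 1) (k : ℤ),
          0 ≤ j ∧ j < ((pvAState n k).2.size : ℤ) := by
        rw [hL2, ← hL1]; exact hb1
      constructor
      · rw [pv_foldl_set_length (fun (c : Array ℤ) (j : ℤ) => c.setIfInBounds j.toNat 0) (fun _ => (0:ℤ)) 0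
          (fun _ _ => rfl)]
        exact hL1
      constructor
      · rw [pv_foldl_set_length (fun (c : Array ℤ) (j : ℤ) => c.setIfInBounds j.toNat (c.getD j.toNat 0 + (k:ℤ)))
          (fun x => x + (k:ℤ)) 0 (fun _ _ => rfl)]
        exact hL2
      intro m hm
      obtain ⟨h1, h2⟩ := hInv m hm
      have hmem : ((m : ℤ) ∈ PySem.List.pyRange (k : ℤ) ((n : ℤ) + 1) (k : ℤ))
          ↔ (k ≤ m ∧ m ≤ n ∧ k ∣ m) := pv_mem_mult_range' k n hk1 m
      constructor
      · rw [pv_foldl_set_getD (fun (c : Array ℤ) (j : ℤ) => c.setIfInBounds j.toNat 0) (fun _ => (0:ℤ)) 0 (fun _ _ => rfl) _ _ hnd hb1 m, h1]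
        by_cases hin : k ≤ m ∧ m ≤ n ∧ k ∣ m
        · rw [if_pos (hmem.mpr hin),
            if_pos ((pv_markedA_succ k m).mpr (Or.inr ⟨hp, hin.2.2, hin.1⟩))]
        · rw [if_neg (fun h => hin (hmem.mp h))]
          by_cases hx : pvMarkedA k m
          · rw [if_pos hx, if_pos ((pv_markedA_succ k m).mpr (Or.inl hx))]
          · rw [if_neg hx, if_neg (fun h => by
              rcases (pv_markedA_succ k m).mp h with h | h
              exacts [hx h, hin ⟨h.2.2, hm, h.2.1⟩])]
      · rw [pv_foldl_set_getD (fun (c : Array ℤ) (j : ℤ) => c.setIfInBounds j.toNat (c.getD j.toNat 0 + (k:ℤ)))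
          (fun x => x + (k:ℤ)) 0 (fun _ _ => rfl) _ _ hnd hb2 m, h2, pv_sumA_succ]
        by_cases hin : k ≤ m ∧ m ≤ n ∧ k ∣ m
        · rw [if_pos (hmem.mpr hin), if_pos ⟨hp, hin.2.2, hin.1⟩]
          push_cast; ring
        · rw [if_neg (fun h => hin (hmem.mp h)), if_neg (fun h => hin ⟨h.2.2, hm, h.2.1⟩),
            Nat.add_zero]

-- ---- A's second pass ----
theorem pv_aSquares_cond_false (n k m : ℕ) (hm : m ≤ n) (hkk : n < k * k) :
    ¬ (k ≤ Nat.sqrt m ∧ Nat.sqrt m * Nat.sqrt m = m) := by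
  rintro ⟨h1, h2⟩
  have : k * k ≤ Nat.sqrt m * Nat.sqrt m := Nat.mul_le_mul h1 h1
  omega

theorem pv_aSquares_aux (n : ℕ) : ∀ (d k : ℕ), n + 1 ≤ k + d → 2 ≤ k →
    ∀ (s : Array ℤ), s.size = n + 1 →
    ((emirpASquares (n : ℤ) (PySem.List.pyRange (k : ℤ) ((n : ℤ) + 1) 1) s).size = n + 1) ∧
    ∀ m ≤ n, (emirpASquares (n : ℤ) (PySem.List.pyRange (k : ℤ) ((n : ℤ) + 1) 1) s).getD m 0
      = s.getD m 0 + (if k ≤ Nat.sqrt m ∧ Nat.sqrt m * Nat.sqrt m = m then (Nat.sqrt m : ℤ) else 0) := by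
  intro d
  induction d with
  | zero =>
    intro k hkd hk s hs
    have hnil : PySem.List.pyRange (k : ℤ) ((n : ℤ) + 1) 1 = [] :=
      PySem.List.pyRange_one_eq_nil (by omega)
    rw [hnil]
    refine ⟨hs, fun m hm => ?_⟩
    rw [if_neg (pv_aSquares_cond_false n k m hm (by nlinarith)), emirpASquares]
    omega
  | succ d ih =>
    intro k hkd hk s hs
    by_cases hkn : n + 1 ≤ k
    · have hnil : PySem.List.pyRange (k : ℤ) ((n : ℤ) + 1) 1 = [] :=
        PySem.List.pyRange_one_eq_nil (by omega)
      rw [hnil]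
      refine ⟨hs, fun m hm => ?_⟩
      rw [if_neg (pv_aSquares_cond_false n k m hm (by nlinarith)), emirpASquares]
      omega
    · have hcons : PySem.List.pyRange (k : ℤ) ((n : ℤ) + 1) 1
          = (k : ℤ) :: PySem.List.pyRange ((k : ℤ) + 1) ((n : ℤ) + 1) 1 :=
        PySem.List.pyRange_one_cons (by omega)
      rw [hcons]
      by_cases hbig : n < k * k
      · have hif : ((k : ℤ) * (k : ℤ) > (n : ℤ)) := by exact_mod_cast hbig
        rw [emirpASquares, if_pos hif]
        exact ⟨hs, fun m hm => by
          rw [if_neg (pv_aSquares_cond_false n k m hm hbig)]; omega⟩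
      · have hif : ¬ ((k : ℤ) * (k : ℤ) > (n : ℤ)) := by
          push Not
          exact_mod_cast (by omega : k * k ≤ n)
        rw [emirpASquares, if_neg hif]
        have hcast : (((k : ℤ) * (k : ℤ))).toNat = k * k := by
          rw [show ((k : ℤ) * (k : ℤ)) = ((k * k : ℕ) : ℤ) by push_cast; ring, Int.toNat_natCast]
        have hidx : k * k < s.size := by omega
        have hset : s.setIfInBounds (((k : ℤ) * (k : ℤ))).toNat
              (s.getD (((k : ℤ) * (k : ℤ))).toNat 0 + (k : ℤ))
            = s.setIfInBounds (k * k) (s.getD (k * k) 0 + (k : ℤ)) := by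
          rw [hcast]
        rw [hset]
        have hlen' : (s.setIfInBounds (k * k) (s.getD (k * k) 0 + (k : ℤ))).size = n + 1 := by
          simpa [Array.size_setIfInBounds] using hs
        have hrange : ((k : ℤ) + 1) = (((k + 1 : ℕ) : ℤ)) := by push_cast; ring
        rw [hrange]
        obtain ⟨hL, hV⟩ := ih (k + 1) (by omega) (by omega) _ hlen'
        refine ⟨hL, fun m hm => ?_⟩
        rw [hV m hm, pv_getD_set _ _ _ _ _ hidx]
        by_cases hmk : m = k * k
        · subst hmk
          have hsq : Nat.sqrt (k * k) = k := Nat.sqrt_eq k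
          rw [if_pos rfl, if_neg (by rw [hsq]; omega), if_pos ⟨by omega, by rw [hsq]⟩, hsq]
          ring
        · rw [if_neg hmk]
          by_cases hc : k + 1 ≤ Nat.sqrt m ∧ Nat.sqrt m * Nat.sqrt m = m
          · rw [if_pos hc, if_pos ⟨by omega, hc.2⟩]
          · rw [if_neg hc, if_neg (fun h => by
              rcases Nat.lt_or_ge k (Nat.sqrt m) with hlt | hge
              · exact hc ⟨by omega, h.2⟩
              · have hkm : Nat.sqrt m = k := by omega
                exact hmk (by rw [← h.2, hkm]))]

-- ---- B's sieve ----
theorem pv_markedB_stable (K K' m : ℕ) (hK : ∀ p, p.Prime → p * p ≤ m → p < K)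
    (hK' : ∀ p, p.Prime → p * p ≤ m → p < K') : pvMarkedB K m ↔ pvMarkedB K' m := by
  constructor
  · rintro ⟨p, -, hp, hdvd, hsq⟩; exact ⟨p, hK' p hp hsq, hp, hdvd, hsq⟩
  · rintro ⟨p, -, hp, hdvd, hsq⟩; exact ⟨p, hK p hp hsq, hp, hdvd, hsq⟩

theorem pv_markedB_le_bound (p m : ℕ) (hp : p.Prime) (hsq : p * p ≤ m) : p < m + 1 := by
  have h2 := hp.two_le; nlinarith

theorem pv_bSieve_aux (n : ℕ) : ∀ (d k : ℕ), n + 1 ≤ k + d → 2 ≤ k →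
    ∀ comp : Array Bool, comp.size = n + 1 →
    (∀ m ≤ n, comp.getD m false = decide (pvMarkedB k m)) →
    ((emirpAltSieve (n : ℤ) (k : ℤ) comp).size = n + 1) ∧
    ∀ m ≤ n, (emirpAltSieve (n : ℤ) (k : ℤ) comp).getD m false = decide (pvMarkedB (n + 1) m) := by
  intro d
  induction d with
  | zero =>
    intro k hkd hk comp hlen hinv
    have hbig : n < k * k := by nlinarith
    have hstop : ¬ ((k : ℤ) * (k : ℤ) ≤ (n : ℤ)) := by exact_mod_cast (by omega : ¬ (k * k ≤ n))
    rw [emirpAltSieve, if_neg hstop]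
    refine ⟨hlen, fun m hm => ?_⟩
    rw [hinv m hm, decide_eq_decide]
    exact pv_markedB_stable _ _ _
      (fun p hp hsq => by nlinarith)
      (fun p hp hsq => by have := pv_markedB_le_bound p m hp hsq; omega)
  | succ d ih =>
    intro k hkd hk comp hlen hinv
    by_cases hbig : n < k * k
    · have hstop : ¬ ((k : ℤ) * (k : ℤ) ≤ (n : ℤ)) := by exact_mod_cast (by omega : ¬ (k * k ≤ n))
      rw [emirpAltSieve, if_neg hstop]
      refine ⟨hlen, fun m hm => ?_⟩
      rw [hinv m hm, decide_eq_decide]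
      exact pv_markedB_stable _ _ _
        (fun p hp hsq => by nlinarith)
        (fun p hp hsq => by have := pv_markedB_le_bound p m hp hsq; omega)
    · have hgo : ((k : ℤ) * (k : ℤ) ≤ (n : ℤ)) := by exact_mod_cast (by omega : k * k ≤ n)
      rw [emirpAltSieve, if_pos hgo]
      have hget : comp.getD ((k : ℤ)).toNat false = decide (pvMarkedB k k) := by
        rw [Int.toNat_natCast]
        exact hinv k (by nlinarith)
      by_cases hMk : pvMarkedB k k
      · -- k composite: no marking
        have hnp : ¬ k.Prime := (pv_markedB_self k hk).mp hMk
        rw [hget, if_neg (by simp [hMk])]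
        have hinv' : ∀ m ≤ n, comp.getD m false = decide (pvMarkedB (k + 1) m) := by
          intro m hm
          rw [hinv m hm, decide_eq_decide, pv_markedB_succ]
          exact ⟨Or.inl, fun h => h.resolve_right (fun h' => hnp h'.1)⟩
        have hcast : ((k : ℤ) + 1) = (((k + 1 : ℕ)) : ℤ) := by push_cast; ring
        rw [hcast]
        exact ih (k + 1) (by omega) (by omega) comp hlen hinv'
      · -- k prime: mark multiples of k from k*k
        have hp : k.Prime := by
          by_contra hnp
          exact hMk ((pv_markedB_self k hk).mpr hnp)
        rw [hget, if_pos (by simp [hMk])]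
        unfold emirpAltMark
        have hkpos : (0 : ℤ) < (k : ℤ) := by exact_mod_cast (by omega : 0 < k)
        have hnd := pv_nodup_pyRange_pos ((k : ℤ) * (k : ℤ)) ((n : ℤ) + 1) (k : ℤ) hkpos
        have hb : ∀ j ∈ PySem.List.pyRange ((k : ℤ) * (k : ℤ)) ((n : ℤ) + 1) (k : ℤ),
            0 ≤ j ∧ j < (comp.size : ℤ) := by
          intro j hj
          obtain ⟨ha, hb, -⟩ := (PySem.List.mem_pyRange_iff_of_pos hkpos j).mp hj
          rw [hlen]; push_cast
          constructor
          · nlinarith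
          · omega
        have hlen' : ((PySem.List.pyRange ((k : ℤ) * (k : ℤ)) ((n : ℤ) + 1) (k : ℤ)).foldl
            (fun (c : Array Bool) (j : ℤ) => c.setIfInBounds j.toNat true) comp).size = n + 1 := by
          rw [pv_foldl_set_length (fun (c : Array Bool) (j : ℤ) => c.setIfInBounds j.toNat true)
            (fun _ => true) false (fun _ _ => rfl)]
          exact hlen
        have hinv' : ∀ m ≤ n, ((PySem.List.pyRange ((k : ℤ) * (k : ℤ)) ((n : ℤ) + 1) (k : ℤ)).foldl
            (fun (c : Array Bool) (j : ℤ) => c.setIfInBounds j.toNat true) comp).getD m false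
              = decide (pvMarkedB (k + 1) m) := by
          intro m hm
          rw [pv_foldl_set_getD (fun (c : Array Bool) (j : ℤ) => c.setIfInBounds j.toNat true)
            (fun _ => true) false (fun _ _ => rfl) _ _ hnd hb m, hinv m hm]
          have hmem : ((m : ℤ) ∈ PySem.List.pyRange ((k : ℤ) * (k : ℤ)) ((n : ℤ) + 1) (k : ℤ))
              ↔ (k * k ≤ m ∧ m ≤ n ∧ k ∣ m) := pv_mem_mult_range k n hk m
          by_cases hin : k * k ≤ m ∧ m ≤ n ∧ k ∣ m
          · rw [if_pos (hmem.mpr hin)]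
            exact (decide_eq_true ((pv_markedB_succ k m).mpr (Or.inr ⟨hp, hin.2.2, hin.1⟩))).symm
          · rw [if_neg (fun h => hin (hmem.mp h)), decide_eq_decide, pv_markedB_succ]
            constructor
            · exact Or.inl
            · rintro (h | ⟨-, hdvd, hsq⟩)
              · exact h
              · exact absurd ⟨hsq, hm, hdvd⟩ hin
        have hcast : ((k : ℤ) + 1) = (((k + 1 : ℕ)) : ℤ) := by push_cast; ring
        rw [hcast]
        exact ih (k + 1) (by omega) (by omega) _ hlen' hinv'

-- ---- counting ----
theorem pv_countP_or {α : Type} (l : List α) (P Q : α → Prop) [DecidablePred P] [DecidablePred Q]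
    (h : ∀ x ∈ l, ¬ (P x ∧ Q x)) :
    l.countP (fun x => decide (P x ∨ Q x))
      = l.countP (fun x => decide (P x)) + l.countP (fun x => decide (Q x)) := by
  induction l with
  | nil => rfl
  | cons a l ih =>
    simp only [List.countP_cons]
    rw [ih (fun x hx => h x (List.mem_cons_of_mem a hx))]
    have := h a (List.mem_cons_self ..)
    by_cases hP : P a <;> by_cases hQ : Q a <;> simp_all <;> omega

theorem pv_main (N : Int) : emirpNumbers N = emirpNumbers_alt N := by
  by_cases hN : N < 2
  · -- both programs do nothing
    have hnil : PySem.List.pyRange 2 (N + 1) 1 = [] :=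
      PySem.List.pyRange_one_eq_nil (by omega)
    rw [emirpNumbers_alt, if_pos hN]
    rw [emirpNumbers, hnil]
    simp [emirpASquares]
  · obtain ⟨n, rfl⟩ : ∃ n : ℕ, N = (n : ℤ) := ⟨N.toNat, (Int.toNat_of_nonneg (by omega)).symm⟩
    have hn : 2 ≤ n := by exact_mod_cast (by omega : (2:ℤ) ≤ (n:ℤ))
    have hTo : (((n : ℤ)) + 1).toNat = n + 1 := by omega
    have hcast1 : ((n : ℤ) + 1) = (((n + 1 : ℕ)) : ℤ) := by push_cast; ring
    -- A's first pass
    obtain ⟨hL1, hL2, hInv⟩ := pv_aLoop n (n + 1) (by omega) (by omega)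
    -- A's second pass, from k = 2
    obtain ⟨hQL, hQV⟩ := pv_aSquares_aux n (n - 1) 2 (by omega) (by omega)
      (pvAState n (n + 1)).2 hL2
    have h2' : (((2 : ℕ)) : ℤ) = (2 : ℤ) := by norm_num
    rw [h2'] at hQL hQV
    -- the final table of A
    have hsums : ∀ m ≤ n,
        (emirpASquares (n : ℤ) (PySem.List.pyRange (2 : ℤ) ((n : ℤ) + 1) 1)
          (pvAState n (n + 1)).2).getD m 0 = ((pvSpd m + pvCorr m : ℕ) : ℤ) := by
      intro m hm
      rw [hQV m hm, (hInv m hm).2, pv_sumA_final n m hm, pvCorr]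
      by_cases h1 : Nat.sqrt m * Nat.sqrt m = m ∧ 2 ≤ Nat.sqrt m
      · rw [if_pos ⟨h1.2, h1.1⟩, if_pos h1]; push_cast; ring
      · rw [if_neg (fun h => h1 ⟨h.2, h.1⟩), if_neg h1]; push_cast; ring
    -- evaluate A
    have hA : emirpNumbers (n : ℤ)
        = ((PySem.List.pyRange 2 ((n : ℤ) + 1) 1).countP
            (fun i => decide (i.toNat.Prime ∨ i.toNat = 4)) : ℤ) := by
      rw [emirpNumbers]
      have hstate : List.foldl (emirpAStep (n : ℤ))
          (Array.replicate (((n : ℤ) + 1).toNat) (1 : ℤ), Array.replicate (((n : ℤ) + 1).toNat) (0 : ℤ))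
          (PySem.List.pyRange 2 ((n : ℤ) + 1) 1) = pvAState n (n + 1) := by
        rw [pvAState, hTo, ← hcast1]
      rw [hstate]
      have hfold : ∀ (l : List ℤ) (s2 : Array ℤ) (a : ℤ),
          l.foldl (fun ans i => ans + (if s2.getD i.toNat 0 = i then 1 else 0)) a
            = l.foldl (fun ans i => if s2.getD i.toNat 0 = i then ans + 1 else ans) a := by
        intro l s2
        induction l with
        | nil => intro a; rfl
        | cons x l ih =>
          intro a
          rw [List.foldl_cons, List.foldl_cons, ih]
          by_cases h : s2.getD x.toNat 0 = x
          · rw [if_pos h, if_pos h]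
          · rw [if_neg h, if_neg h]; ring_nf
      rw [hfold, PySem.List.foldl_ite_add_one, zero_add, Int.ofNat_inj]
      refine List.countP_congr fun i hi => ?_
      obtain ⟨hi2, hin⟩ := PySem.List.mem_pyRange_one.mp hi
      have hmi : i = ((i.toNat : ℕ) : ℤ) := by omega
      set m := i.toNat with hm
      have hmn : m ≤ n := by omega
      have hm2 : 2 ≤ m := by omega
      have hgetD : (emirpASquares (↑n) (PySem.List.pyRange 2 (↑n + 1) 1)
            (pvAState n (n+1)).2).getD i.toNat 0 = ((pvSpd m + pvCorr m : ℕ) : ℤ) := by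
        exact hsums m hmn
      constructor
      · intro h
        have h' := of_decide_eq_true h
        rw [hgetD, hmi] at h'
        have : pvSpd m + pvCorr m = m := by exact_mod_cast h'
        exact decide_eq_true ((pv_predA_iff m hm2).mp this)
      · intro h
        have h' := of_decide_eq_true h
        have : pvSpd m + pvCorr m = m := (pv_predA_iff m hm2).mpr h'
        refine decide_eq_true ?_
        rw [hgetD, hmi]
        exact_mod_cast this
    -- evaluate B
    have hB : emirpNumbers_alt (n : ℤ)
        = (if (n : ℤ) ≥ 4 then 1 else 0)
          + ((PySem.List.pyRange 2 ((n : ℤ) + 1) 1).countP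
              (fun i => decide (i.toNat.Prime)) : ℤ) := by
      rw [emirpNumbers_alt, if_neg (by omega)]
      obtain ⟨hSL, hSV⟩ := pv_bSieve_aux n (n - 1) 2 (by omega) (by omega)
        (Array.replicate (((n:ℤ) + 1).toNat) false)
        (by rw [hTo]; exact Array.size_replicate)
        (by
          intro m hm
          have hf : ¬ pvMarkedB 2 m := by
            rintro ⟨p, hp2, hp, -⟩
            have := hp.two_le; omega
          rw [decide_eq_false hf, hTo]
          exact pv_getD_replicate _ _ _ _ (by omega))
      have hnum2 : ((2:ℕ) : ℤ) = (2 : ℤ) := by norm_num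
      rw [hnum2] at hSL hSV
      rw [PySem.List.foldl_ite_add_one]
      congr 1
      rw [Int.ofNat_inj]
      refine List.countP_congr fun i hi => ?_
      obtain ⟨hi2, hin⟩ := PySem.List.mem_pyRange_one.mp hi
      have hmi : i = ((i.toNat : ℕ) : ℤ) := by omega
      set m := i.toNat with hm
      have hmn : m ≤ n := by omega
      have hm2 : 2 ≤ m := by omega
      have hgetD : (emirpAltSieve (↑n) 2
            (Array.replicate (((n:ℤ) + 1).toNat) false)).getD i.toNat false
          = decide (pvMarkedB (n + 1) m) := by
        exact hSV m hmn
      rw [hgetD]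
      have hiff : pvMarkedB (n + 1) m ↔ ¬ m.Prime := pv_markedB_final (n + 1) m hm2 (by omega)
      constructor
      · intro h
        have h' := of_decide_eq_true h
        by_cases hmp : m.Prime
        · exact decide_eq_true hmp
        · exact absurd (decide_eq_true (hiff.mpr hmp)) (by rw [h']; simp)
      · intro h
        have h' := of_decide_eq_true h
        refine decide_eq_true ?_
        rw [decide_eq_false (fun hmk => (hiff.mp hmk) h')]
    -- combine the two counts
    rw [hA, hB]
    have hsplit : (PySem.List.pyRange 2 ((n : ℤ) + 1) 1).countP
        (fun i => decide (i.toNat.Prime ∨ i.toNat = 4))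
      = (PySem.List.pyRange 2 ((n : ℤ) + 1) 1).countP (fun i => decide (i.toNat.Prime))
        + (PySem.List.pyRange 2 ((n : ℤ) + 1) 1).countP (fun i => decide (i.toNat = 4)) := by
      refine pv_countP_or _ _ _ fun i hi => ?_
      rintro ⟨hp, h4⟩
      rw [h4] at hp
      norm_num at hp
    have hfour : (PySem.List.pyRange 2 ((n : ℤ) + 1) 1).countP (fun i => decide (i.toNat = 4))
        = if 4 ≤ n then 1 else 0 := by
      have hc : (PySem.List.pyRange 2 ((n : ℤ) + 1) 1).countP (fun i => decide (i.toNat = 4))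
          = (PySem.List.pyRange 2 ((n : ℤ) + 1) 1).count (4 : ℤ) := by
        rw [List.count_eq_countP']
        refine List.countP_congr fun i hi => ?_
        obtain ⟨hi2, hin⟩ := PySem.List.mem_pyRange_one.mp hi
        simp only [decide_eq_true_eq, beq_iff_eq]
        omega
      rw [hc]
      by_cases h4 : 4 ≤ n
      · rw [if_pos h4]
        exact List.count_eq_one_of_mem (PySem.List.nodup_pyRange_one _ _)
          (PySem.List.mem_pyRange_one.mpr ⟨by omega, by omega⟩)
      · rw [if_neg h4, List.count_eq_zero]
        intro hmem
        obtain ⟨h1, h2⟩ := PySem.List.mem_pyRange_one.mp hmem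
        omega
    rw [hsplit, hfour]
    have : ((n : ℤ) ≥ 4) ↔ (4 ≤ n) := by omega
    by_cases h4 : 4 ≤ n
    · rw [if_pos h4, if_pos (this.mpr h4)]; push_cast; ring
    · rw [if_neg h4, if_neg (fun h => h4 (this.mp h))]; push_cast; ring

-- ===== VERDICT (by name: the statement is the Claim_ definition above) =====
theorem emirpNumbers_spec : Claim_equal_emirpNumbers := by
  intro N _
  exact pv_main N
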